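-- pv_equiv track=rewrite | github.com/ouss-emtl/LabyrinthGame | labyrinthe/labyrinthe_grille.py | creer_vue
-- ===== SOURCE A (Python) =====
-- from copy import deepcopy
--
-- def creer_vue(grille, grille_eclairage, position, portee_affichage):
--     def vue_unique(vue_grille, vue_grille_eclairage):
--        """
--        Condense les deux vues pour avoir un mvp plus lisible
--        -1 : hors de la grille
--        0: mur et/ou zone non éclairée
--        1: vide éclairé
--        :param vue_grille:
--        :param vue_grille_affichage:
--        :return:
--        """
--        n = len(vue_grille)
--        vue = deepcopy(vue_grille)
--        for i in range(n):
--            for j in range(n):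
--                if (vue_grille[i][j] != 0) and vue_grille_eclairage[i][j] == 0:
--                    vue[i][j] = 0
--
--        return vue
--
--
--     def creer_deux_vues(grille, grille_eclairage, position, portee_affichage):
--         """
--         Une vue est un couple de matrice (vue_grille, vue_grille_eclairage)
--         Génère la vue, les matrices carrées sont de taille (2*portee_affichage+1)
--         :param grille:
--         :param grille_eclairage:
--         :param position:
--         :param portee_affichage:
--         :return: (vue_grille, vue_grille_eclairage)
--         """
--         vue_grille = [[0 for i in range(2*portee_affichage+1)] for j in range(2*portee_affichage+1)]
--         vue_grille_eclairage = [[0 for i in range(2*portee_affichage+1)] for j in range(2*portee_affichage+1)]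
--         x, y = position
--         n = len(grille)
--         for i in range(x-portee_affichage, x+portee_affichage+1):
--             for j in range(y-portee_affichage, y+portee_affichage+1):
--                 if i>=0 and i<n and j>=0 and j<n:
--                     vue_grille[i-(x-portee_affichage)][j-(y-portee_affichage)] = grille[i][j]
--                     vue_grille_eclairage[i-(x-portee_affichage)][j-(y-portee_affichage)] = grille_eclairage[i][j]
--                 else:
--                     vue_grille[i-(x-portee_affichage)][j-(y-portee_affichage)] = -1
--                     vue_grille_eclairage[i-(x-portee_affichage)][j-(y-portee_affichage)] = -1
--         return (vue_grille, vue_grille_eclairage)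
--
--     a, b = creer_deux_vues(grille, grille_eclairage, position, portee_affichage)
--     return vue_unique(a,b)
-- ===== SOURCE B (Python) =====
-- def creer_vue(grille, grille_eclairage, position, portee_affichage):
--     x, y = position
--     n = len(grille)
--     p = portee_affichage
--
--     def cell(i, j):
--         if 0 <= i < n and 0 <= j < n:
--             v = grille[i][j]
--             if v != 0 and grille_eclairage[i][j] == 0:
--                 return 0
--             return v
--         return -1
--
--     return [[cell(x - p + di, y - p + dj) for dj in range(2 * p + 1)]
--             for di in range(2 * p + 1)]
-- ===== Notes on version B (the rewrite author's own statement) =====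
-- stated objective: simpler
-- what changed: Builds the condensed (2p+1)x(2p+1) view in a single direct comprehension (out-of-bounds -> -1, unlit non-zero cell -> 0, else grid value), instead of materialising two intermediate window matrices and then condensing them in a second nested scan.
import Mathlib
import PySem

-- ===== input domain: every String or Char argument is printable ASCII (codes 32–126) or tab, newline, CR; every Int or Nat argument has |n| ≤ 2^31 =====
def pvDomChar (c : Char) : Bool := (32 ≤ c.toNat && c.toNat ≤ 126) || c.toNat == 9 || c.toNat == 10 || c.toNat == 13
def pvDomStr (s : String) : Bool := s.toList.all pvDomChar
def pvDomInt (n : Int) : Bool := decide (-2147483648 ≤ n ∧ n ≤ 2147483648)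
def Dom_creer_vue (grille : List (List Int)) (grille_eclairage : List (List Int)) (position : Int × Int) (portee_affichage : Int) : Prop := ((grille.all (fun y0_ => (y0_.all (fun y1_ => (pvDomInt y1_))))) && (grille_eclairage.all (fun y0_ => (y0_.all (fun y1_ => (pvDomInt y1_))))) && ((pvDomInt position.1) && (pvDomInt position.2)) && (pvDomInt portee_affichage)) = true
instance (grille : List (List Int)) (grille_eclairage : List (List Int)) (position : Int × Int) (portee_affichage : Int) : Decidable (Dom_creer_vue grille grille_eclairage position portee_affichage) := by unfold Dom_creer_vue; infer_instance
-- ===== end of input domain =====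

-- B builds the condensed view in one direct pass over the output window instead of A's
-- two intermediate window matrices plus a second condensing scan (objective: simpler).

-- ===== PORT A =====
-- Python's `m[k][l] = v`; both indices are nonnegative and in range at every call site
-- of A's loops, so the total `List.set` form is exact there.
def pvSetCell (m : List (List Int)) (k l : Nat) (v : Int) : List (List Int) :=
  m.set k ((m.getD k []).set l v)

-- inner helper `creer_deux_vues`; `grille[i][j]` / `grille_eclairage[i][j]` are read with
-- 0 ≤ i, 0 ≤ j guaranteed by the branch; the `getD` total form is exact under Pre_creer_vue.
def pv_creer_deux_vues (grille : List (List Int)) (grille_eclairage : List (List Int))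
    (position : Int × Int) (portee_affichage : Int) :
    List (List Int) × List (List Int) :=
  let vue_grille := (PySem.List.pyRange 0 (2*portee_affichage+1) 1).map
      (fun _ => (PySem.List.pyRange 0 (2*portee_affichage+1) 1).map (fun _ => (0:Int)))
  let vue_grille_eclairage := (PySem.List.pyRange 0 (2*portee_affichage+1) 1).map
      (fun _ => (PySem.List.pyRange 0 (2*portee_affichage+1) 1).map (fun _ => (0:Int)))
  let x := position.1
  let y := position.2
  let n : Int := grille.length
  (PySem.List.pyRange (x - portee_affichage) (x + portee_affichage + 1) 1).foldl (fun st i =>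
    (PySem.List.pyRange (y - portee_affichage) (y + portee_affichage + 1) 1).foldl (fun st j =>
      if 0 ≤ i ∧ i < n ∧ 0 ≤ j ∧ j < n then
        (pvSetCell st.1 (i - (x - portee_affichage)).toNat (j - (y - portee_affichage)).toNat
           ((grille.getD i.toNat []).getD j.toNat 0),
         pvSetCell st.2 (i - (x - portee_affichage)).toNat (j - (y - portee_affichage)).toNat
           ((grille_eclairage.getD i.toNat []).getD j.toNat 0))
      else
        (pvSetCell st.1 (i - (x - portee_affichage)).toNat (j - (y - portee_affichage)).toNat (-1),
         pvSetCell st.2 (i - (x - portee_affichage)).toNat (j - (y - portee_affichage)).toNat (-1)))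
      st)
    (vue_grille, vue_grille_eclairage)

-- inner helper `vue_unique`; indices i, j run over range(n) so `.toNat` is exact.
def pv_vue_unique (vue_grille : List (List Int)) (vue_grille_eclairage : List (List Int)) :
    List (List Int) :=
  let n : Int := vue_grille.length
  (PySem.List.pyRange 0 n 1).foldl (fun vue i =>
    (PySem.List.pyRange 0 n 1).foldl (fun vue j =>
      if (vue_grille.getD i.toNat []).getD j.toNat 0 ≠ 0 ∧
         (vue_grille_eclairage.getD i.toNat []).getD j.toNat 0 = 0 then
        pvSetCell vue i.toNat j.toNat 0
      else vue) vue) vue_grille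

def creer_vue (grille : List (List Int)) (grille_eclairage : List (List Int)) (position : Int × Int) (portee_affichage : Int) : List (List Int) :=
  let ab := pv_creer_deux_vues grille grille_eclairage position portee_affichage
  pv_vue_unique ab.1 ab.2

-- ===== PORT B =====
-- B's inner helper `cell` (short-circuit: the lighting grid is only read when v ≠ 0).
def pvCell (grille : List (List Int)) (grille_eclairage : List (List Int)) (n i j : Int) : Int :=
  if 0 ≤ i ∧ i < n ∧ 0 ≤ j ∧ j < n then
    let v := (grille.getD i.toNat []).getD j.toNat 0
    if v ≠ 0 ∧ (grille_eclairage.getD i.toNat []).getD j.toNat 0 = 0 then 0 else v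
  else -1

def creer_vue_alt (grille : List (List Int)) (grille_eclairage : List (List Int)) (position : Int × Int) (portee_affichage : Int) : List (List Int) :=
  let x := position.1
  let y := position.2
  let n : Int := grille.length
  let p := portee_affichage
  (PySem.List.pyRange 0 (2*p+1) 1).map (fun di =>
    (PySem.List.pyRange 0 (2*p+1) 1).map (fun dj =>
      pvCell grille grille_eclairage n (x - p + di) (y - p + dj)))

-- ===== PRECONDITION & SPEC =====
-- Pre_ excludes exactly the inputs on which A raises IndexError: a window cell (i, j) with
-- 0 ≤ i, j < len(grille) whose row in grille (resp. grille_eclairage) is too short.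
def Pre_creer_vue (grille : List (List Int)) (grille_eclairage : List (List Int)) (position : Int × Int) (portee_affichage : Int) : Prop :=
  ∀ i ∈ List.range grille.length, ∀ j ∈ List.range grille.length,
    (position.1 - portee_affichage ≤ (i:Int) ∧ (i:Int) ≤ position.1 + portee_affichage ∧
     position.2 - portee_affichage ≤ (j:Int) ∧ (j:Int) ≤ position.2 + portee_affichage) →
    j < (grille.getD i []).length ∧ i < grille_eclairage.length ∧
      j < (grille_eclairage.getD i []).length
instance (grille : List (List Int)) (grille_eclairage : List (List Int)) (position : Int × Int) (portee_affichage : Int) : Decidable (Pre_creer_vue grille grille_eclairage position portee_affichage) := by unfold Pre_creer_vue; infer_instance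

def pvWitness_creer_vue : List (List Int) × List (List Int) × (Int × Int) × Int :=
  ([[1, 0], [0, 1]], [[1, 1], [1, 0]], (0, 0), 1)

def Spec_creer_vue (grille : List (List Int)) (grille_eclairage : List (List Int)) (position : Int × Int) (portee_affichage : Int) (out : List (List Int)) : Prop := out = creer_vue_alt grille grille_eclairage position portee_affichage
instance (grille : List (List Int)) (grille_eclairage : List (List Int)) (position : Int × Int) (portee_affichage : Int) (out : List (List Int)) : Decidable (Spec_creer_vue grille grille_eclairage position portee_affichage out) := by unfold Spec_creer_vue; infer_instance

-- ===== CLAIM (what is proved, stated in full; the proofs are below) =====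
def Claim_equal_creer_vue : Prop := ∀ (grille : List (List Int)) (grille_eclairage : List (List Int)) (position : Int × Int) (portee_affichage : Int), Dom_creer_vue grille grille_eclairage position portee_affichage → Pre_creer_vue grille grille_eclairage position portee_affichage → Spec_creer_vue grille grille_eclairage position portee_affichage (creer_vue grille grille_eclairage position portee_affichage)

-- ===== LEMMAS AND PROOFS =====

-- the cell value A's first stage writes at window offset mapping to grid coordinates (i, j)
def pvVal (g : List (List Int)) (n i j : Int) : Int :=
  if 0 ≤ i ∧ i < n ∧ 0 ≤ j ∧ j < n then (g.getD i.toNat []).getD j.toNat 0 else -1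

theorem pv_set_getD_self {α : Type} (r : List α) (k : Nat) (d : α) :
    r.set k (r.getD k d) = r := by
  induction r generalizing k with
  | nil => simp
  | cons h t ih =>
    cases k with
    | zero => simp
    | succ k => simp only [List.set_cons_succ, List.getD_cons_succ]; rw [ih]

theorem pvSetCell_getD (m : List (List Int)) (k l : Nat) (v : Int) :
    (pvSetCell m k l v).getD k [] = (m.getD k []).set l v := by
  induction m generalizing k with
  | nil => simp [pvSetCell]
  | cons h t ih =>
    cases k with
    | zero => simp [pvSetCell, List.getD]
    | succ k => simpa [pvSetCell, List.getD] using ih k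

theorem pvSetCell_self (m : List (List Int)) (k l : Nat) :
    pvSetCell m k l ((m.getD k []).getD l 0) = m := by
  unfold pvSetCell
  rw [pv_set_getD_self, pv_set_getD_self]

-- a loop writing row `k` of the matrix cell by cell is a single update of row `k`
theorem pv_loopMatGen (k : Nat) (pos : Int → Nat) (V : Int → Int → Int) :
    ∀ (js : List Int) (m : List (List Int)),
      js.foldl (fun m j => pvSetCell m k (pos j) (V j ((m.getD k []).getD (pos j) 0))) m
      = m.set k (js.foldl (fun r j => r.set (pos j) (V j (r.getD (pos j) 0))) (m.getD k [])) := by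
  intro js
  induction js with
  | nil =>
    intro m
    simp only [List.foldl_nil]
    exact (pv_set_getD_self m k []).symm
  | cons j js ih =>
    intro m
    rw [List.foldl_cons, List.foldl_cons, ih, pvSetCell_getD]
    show (pvSetCell m k (pos j) _).set k _ = _
    unfold pvSetCell
    rw [List.set_set]

theorem pv_loopGen_shift {α : Type} (d : α) (U : Int → α → α) :
    ∀ (js : List Int) (a : Int) (h : α) (t : List α), (∀ j ∈ js, a + 1 ≤ j) →
      js.foldl (fun r j => r.set (j - a).toNat (U j (r.getD (j - a).toNat d))) (h :: t)
      = h :: js.foldl (fun r j => r.set (j - (a+1)).toNat (U j (r.getD (j - (a+1)).toNat d))) t := by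
  intro js
  induction js with
  | nil => intro a h t _; simp
  | cons j js ih =>
    intro a h t hj
    have h1 : (j - a).toNat = (j - (a+1)).toNat + 1 := by
      have := hj j (by simp)
      omega
    rw [List.foldl_cons, List.foldl_cons, h1, List.set_cons_succ, List.getD_cons_succ]
    exact ih a h _ (fun j' hm => hj j' (by simp [hm]))

-- a loop writing positions 0 .. c-1 of a length-c list in order, each exactly once
theorem pv_loopGen {α : Type} (d : α) (U : Int → α → α) :
    ∀ (c : Nat) (a : Int) (row : List α), row.length = c →
      ((List.range c).map (fun t : Nat => a + (t:Int))).foldl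
        (fun r j => r.set (j - a).toNat (U j (r.getD (j - a).toNat d))) row
      = (List.range c).map (fun l : Nat => U (a + (l:Int)) (row.getD l d)) := by
  intro c
  induction c with
  | zero =>
    intro a row hrow
    rw [List.length_eq_zero_iff] at hrow
    subst hrow
    simp
  | succ c ih =>
    intro a row hrow
    obtain ⟨h, t, rfl⟩ : ∃ h t, row = h :: t := by
      cases row with
      | nil => simp at hrow
      | cons h t => exact ⟨h, t, rfl⟩
    have ht : t.length = c := by simpa using hrow
    rw [List.range_succ_eq_map]
    simp only [List.map_cons, List.map_map, List.foldl_cons]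
    have e0 : ((a + ((0:Nat):Int)) - a).toNat = 0 := by simp
    rw [e0]
    simp only [List.set_cons_zero, List.getD_cons_zero]
    have hlist : (List.range c).map ((fun t : Nat => a + (t:Int)) ∘ Nat.succ)
        = (List.range c).map (fun t : Nat => (a+1) + (t:Int)) := by
      apply List.map_congr_left
      intro t _
      simp [Function.comp]
      ring
    rw [hlist, pv_loopGen_shift d U _ a _ t (by
      intro j hm
      simp only [List.mem_map, List.mem_range] at hm
      obtain ⟨t', _, rfl⟩ := hm
      omega), ih (a+1) t ht]
    congr 1
    apply List.map_congr_left
    intro l _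
    simp only [Function.comp_apply, List.getD_cons_succ]
    congr 1
    omega

-- A's first stage (per matrix): the double write loop fills the window matrix pointwise
theorem pv_matFill (g : List (List Int)) (n : Int) (c : Nat) (A B : Int) :
    ((List.range c).map (fun t : Nat => A + (t:Int))).foldl
      (fun m i => ((List.range c).map (fun t : Nat => B + (t:Int))).foldl
        (fun m j => pvSetCell m (i - A).toNat (j - B).toNat (pvVal g n i j)) m)
      ((List.range c).map (fun _ => (List.range c).map (fun _ => (0:Int))))
    = (List.range c).map (fun k : Nat => (List.range c).map
        (fun l : Nat => pvVal g n (A + (k:Int)) (B + (l:Int)))) := by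
  have hin : ∀ (i : Int) (m : List (List Int)),
      ((List.range c).map (fun t : Nat => B + (t:Int))).foldl
        (fun m j => pvSetCell m (i - A).toNat (j - B).toNat (pvVal g n i j)) m
      = m.set (i - A).toNat (((List.range c).map (fun t : Nat => B + (t:Int))).foldl
          (fun r j => r.set (j - B).toNat (pvVal g n i j)) (m.getD (i - A).toNat [])) := by
    intro i m
    exact pv_loopMatGen (i - A).toNat (fun j => (j - B).toNat) (fun j _ => pvVal g n i j) _ m
  have hstep : (fun (m : List (List Int)) (i : Int) =>
      ((List.range c).map (fun t : Nat => B + (t:Int))).foldl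
        (fun m j => pvSetCell m (i - A).toNat (j - B).toNat (pvVal g n i j)) m)
      = fun m i => m.set (i - A).toNat
          ((fun (i : Int) (cur : List Int) => ((List.range c).map (fun t : Nat => B + (t:Int))).foldl
            (fun r j => r.set (j - B).toNat (pvVal g n i j)) cur) i (m.getD (i - A).toNat [])) := by
    funext m i
    exact hin i m
  rw [hstep, pv_loopGen ([] : List Int)
      (fun i cur => ((List.range c).map (fun t : Nat => B + (t:Int))).foldl
        (fun r j => r.set (j - B).toNat (pvVal g n i j)) cur) c A _ (by simp)]
  apply List.map_congr_left
  intro k hk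
  rw [List.mem_range] at hk
  rw [PySem.List.getD_map_range _ _ _ _ hk]
  exact pv_loopGen (0:Int) (fun j _ => pvVal g n (A + (k:Int)) j) c B _ (by simp)

-- A's second stage on pointwise-given window matrices
theorem pv_vue_unique_eq (c : Nat) (f e : Nat → Nat → Int) :
    pv_vue_unique ((List.range c).map (fun k => (List.range c).map (fun l => f k l)))
                  ((List.range c).map (fun k => (List.range c).map (fun l => e k l)))
    = (List.range c).map (fun k => (List.range c).map
        (fun l => if f k l ≠ 0 ∧ e k l = 0 then 0 else f k l)) := by
  have hlen : (((List.range c).map (fun k => (List.range c).map (fun l => f k l))).length : Int) = (c : Int) := by simp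
  simp only [pv_vue_unique]
  rw [hlen, PySem.List.pyRange_one, show (((c:Int)) - 0).toNat = c by omega]
  set Ag := (List.range c).map (fun k => (List.range c).map (fun l => f k l)) with hAg
  set Eg := (List.range c).map (fun k => (List.range c).map (fun l => e k l)) with hEg
  have hstep : ∀ i : Int, (fun (vue : List (List Int)) (j : Int) =>
      if (Ag.getD i.toNat []).getD j.toNat 0 ≠ 0 ∧ (Eg.getD i.toNat []).getD j.toNat 0 = 0 then
        pvSetCell vue i.toNat j.toNat 0
      else vue)
      = fun vue j => pvSetCell vue (i - 0).toNat (j - 0).toNat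
          (if (Ag.getD i.toNat []).getD j.toNat 0 ≠ 0 ∧ (Eg.getD i.toNat []).getD j.toNat 0 = 0
           then 0 else (vue.getD (i - 0).toNat []).getD (j - 0).toNat 0) := by
    intro i
    funext vue j
    simp only [Int.sub_zero]
    split_ifs with hb
    · rfl
    · rw [pvSetCell_self]
  have hin : ∀ (i : Int) (vue : List (List Int)),
      ((List.range c).map (fun t : Nat => (0:Int) + (t:Int))).foldl
        (fun vue j => pvSetCell vue (i - 0).toNat (j - 0).toNat
          (if (Ag.getD i.toNat []).getD j.toNat 0 ≠ 0 ∧ (Eg.getD i.toNat []).getD j.toNat 0 = 0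
           then 0 else (vue.getD (i - 0).toNat []).getD (j - 0).toNat 0)) vue
      = vue.set (i - 0).toNat (((List.range c).map (fun t : Nat => (0:Int) + (t:Int))).foldl
          (fun r j => r.set (j - 0).toNat
            (if (Ag.getD i.toNat []).getD j.toNat 0 ≠ 0 ∧ (Eg.getD i.toNat []).getD j.toNat 0 = 0
             then 0 else r.getD (j - 0).toNat 0)) (vue.getD (i - 0).toNat [])) := by
    intro i vue
    exact pv_loopMatGen (i - 0).toNat (fun j => (j - 0).toNat)
      (fun j cur => if (Ag.getD i.toNat []).getD j.toNat 0 ≠ 0 ∧ (Eg.getD i.toNat []).getD j.toNat 0 = 0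
        then 0 else cur) _ vue
  calc ((List.range c).map (fun t : Nat => (0:Int) + (t:Int))).foldl (fun vue i =>
        ((List.range c).map (fun t : Nat => (0:Int) + (t:Int))).foldl (fun vue j =>
          if (Ag.getD i.toNat []).getD j.toNat 0 ≠ 0 ∧ (Eg.getD i.toNat []).getD j.toNat 0 = 0 then
            pvSetCell vue i.toNat j.toNat 0
          else vue) vue) Ag
      = ((List.range c).map (fun t : Nat => (0:Int) + (t:Int))).foldl (fun vue i =>
          vue.set (i - 0).toNat
          ((fun (i : Int) (cur : List Int) =>
            ((List.range c).map (fun t : Nat => (0:Int) + (t:Int))).foldl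
              (fun r j => r.set (j - 0).toNat
                (if (Ag.getD i.toNat []).getD j.toNat 0 ≠ 0 ∧ (Eg.getD i.toNat []).getD j.toNat 0 = 0
                 then 0 else r.getD (j - 0).toNat 0)) cur) i (vue.getD (i - 0).toNat []))) Ag := by
        apply PySem.List.foldl_congr_mem
        intro vue i _
        rw [hstep i]
        exact hin i vue
    _ = (List.range c).map (fun k : Nat =>
          ((List.range c).map (fun t : Nat => (0:Int) + (t:Int))).foldl
            (fun r j => r.set (j - 0).toNat
              (if (Ag.getD ((0:Int) + (k:Int)).toNat []).getD j.toNat 0 ≠ 0 ∧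
                  (Eg.getD ((0:Int) + (k:Int)).toNat []).getD j.toNat 0 = 0
               then 0 else r.getD (j - 0).toNat 0)) (Ag.getD k [])) := by
        exact pv_loopGen (d := ([] : List Int))
          (U := fun (i : Int) (cur : List Int) =>
            ((List.range c).map (fun t : Nat => (0:Int) + (t:Int))).foldl
              (fun r j => r.set (j - 0).toNat
                (if (Ag.getD i.toNat []).getD j.toNat 0 ≠ 0 ∧ (Eg.getD i.toNat []).getD j.toNat 0 = 0
                 then 0 else r.getD (j - 0).toNat 0)) cur) c 0 Ag (by simp [hAg])
    _ = (List.range c).map (fun k => (List.range c).map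
          (fun l => if f k l ≠ 0 ∧ e k l = 0 then 0 else f k l)) := by
        apply List.map_congr_left
        intro k hk
        rw [List.mem_range] at hk
        have hAk : Ag.getD k [] = (List.range c).map (fun l => f k l) := by
          rw [hAg]; exact PySem.List.getD_map_range _ _ _ _ hk
        rw [hAk]
        refine (pv_loopGen (d := (0:Int))
          (U := fun (j : Int) (cur : Int) =>
            if (Ag.getD ((0:Int) + (k:Int)).toNat []).getD j.toNat 0 ≠ 0 ∧
               (Eg.getD ((0:Int) + (k:Int)).toNat []).getD j.toNat 0 = 0
            then 0 else cur) c 0 ((List.range c).map (fun l => f k l)) (by simp)).trans ?_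
        apply List.map_congr_left
        intro l hl
        rw [List.mem_range] at hl
        have hik : ((0:Int) + (k:Int)).toNat = k := by omega
        have hjl : ((0:Int) + (l:Int)).toNat = l := by omega
        simp only [hik, hjl, hAg, hEg, PySem.List.getD_map_range _ _ _ _ hk,
          PySem.List.getD_map_range _ _ _ _ hl]

-- A's first stage, both matrices at once
theorem pv_deux_vues_eq (grille grille_eclairage : List (List Int)) (x y p : Int)
    (hp : 0 < 2*p+1) :
    pv_creer_deux_vues grille grille_eclairage (x, y) p
    = ((List.range (2*p+1).toNat).map (fun k : Nat => (List.range (2*p+1).toNat).map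
         (fun l : Nat => pvVal grille grille.length ((x - p) + (k:Int)) ((y - p) + (l:Int)))),
       (List.range (2*p+1).toNat).map (fun k : Nat => (List.range (2*p+1).toNat).map
         (fun l : Nat => pvVal grille_eclairage grille.length ((x - p) + (k:Int)) ((y - p) + (l:Int))))) := by
  unfold pv_creer_deux_vues
  simp only
  set n : Int := (grille.length : Int) with hn
  set c := (2*p+1).toNat with hc
  have hR0 : PySem.List.pyRange 0 (2*p+1) 1 = (List.range c).map (fun t : Nat => (0:Int) + (t:Int)) := by
    rw [PySem.List.pyRange_one, show ((2*p+1) - 0).toNat = c by omega]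
  have hRx : PySem.List.pyRange (x - p) (x + p + 1) 1
      = (List.range c).map (fun t : Nat => (x - p) + (t:Int)) := by
    rw [PySem.List.pyRange_one, show ((x + p + 1) - (x - p)).toNat = c by omega]
  have hRy : PySem.List.pyRange (y - p) (y + p + 1) 1
      = (List.range c).map (fun t : Nat => (y - p) + (t:Int)) := by
    rw [PySem.List.pyRange_one, show ((y + p + 1) - (y - p)).toNat = c by omega]
  rw [hR0, hRx, hRy]
  simp only [List.map_map, Function.comp_def]
  have hfun : ∀ i : Int, (fun (st : List (List Int) × List (List Int)) (j : Int) =>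
      if 0 ≤ i ∧ i < n ∧ 0 ≤ j ∧ j < n then
        (pvSetCell st.1 (i - (x - p)).toNat (j - (y - p)).toNat ((grille.getD i.toNat []).getD j.toNat 0),
         pvSetCell st.2 (i - (x - p)).toNat (j - (y - p)).toNat ((grille_eclairage.getD i.toNat []).getD j.toNat 0))
      else
        (pvSetCell st.1 (i - (x - p)).toNat (j - (y - p)).toNat (-1),
         pvSetCell st.2 (i - (x - p)).toNat (j - (y - p)).toNat (-1)))
      = fun st j =>
        (pvSetCell st.1 (i - (x - p)).toNat (j - (y - p)).toNat (pvVal grille n i j),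
         pvSetCell st.2 (i - (x - p)).toNat (j - (y - p)).toNat (pvVal grille_eclairage n i j)) := by
    intro i
    funext st j
    by_cases hb : 0 ≤ i ∧ i < n ∧ 0 ≤ j ∧ j < n <;> simp [pvVal, hb]
  have hsplit : ∀ (i : Int) (st : List (List Int) × List (List Int)),
      ((List.range c).map (fun t : Nat => (y - p) + (t:Int))).foldl (fun st j =>
        (pvSetCell st.1 (i - (x - p)).toNat (j - (y - p)).toNat (pvVal grille n i j),
         pvSetCell st.2 (i - (x - p)).toNat (j - (y - p)).toNat (pvVal grille_eclairage n i j))) st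
      = (((List.range c).map (fun t : Nat => (y - p) + (t:Int))).foldl (fun m j =>
           pvSetCell m (i - (x - p)).toNat (j - (y - p)).toNat (pvVal grille n i j)) st.1,
         ((List.range c).map (fun t : Nat => (y - p) + (t:Int))).foldl (fun m j =>
           pvSetCell m (i - (x - p)).toNat (j - (y - p)).toNat (pvVal grille_eclairage n i j)) st.2) := by
    intro i st
    exact PySem.List.foldl_prod_mk
      (f := fun m j => pvSetCell m (i - (x - p)).toNat (j - (y - p)).toNat (pvVal grille n i j))
      (g := fun m j => pvSetCell m (i - (x - p)).toNat (j - (y - p)).toNat (pvVal grille_eclairage n i j))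
      _ st.1 st.2
  calc ((List.range c).map (fun t : Nat => (x - p) + (t:Int))).foldl (fun st i =>
        ((List.range c).map (fun t : Nat => (y - p) + (t:Int))).foldl (fun st j =>
          if 0 ≤ i ∧ i < n ∧ 0 ≤ j ∧ j < n then
            (pvSetCell st.1 (i - (x - p)).toNat (j - (y - p)).toNat ((grille.getD i.toNat []).getD j.toNat 0),
             pvSetCell st.2 (i - (x - p)).toNat (j - (y - p)).toNat ((grille_eclairage.getD i.toNat []).getD j.toNat 0))
          else
            (pvSetCell st.1 (i - (x - p)).toNat (j - (y - p)).toNat (-1),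
             pvSetCell st.2 (i - (x - p)).toNat (j - (y - p)).toNat (-1))) st)
        ((List.range c).map (fun _ => (List.range c).map (fun _ => (0:Int))),
         (List.range c).map (fun _ => (List.range c).map (fun _ => (0:Int))))
      = ((List.range c).map (fun t : Nat => (x - p) + (t:Int))).foldl (fun st i =>
          (((List.range c).map (fun t : Nat => (y - p) + (t:Int))).foldl (fun m j =>
             pvSetCell m (i - (x - p)).toNat (j - (y - p)).toNat (pvVal grille n i j)) st.1,
           ((List.range c).map (fun t : Nat => (y - p) + (t:Int))).foldl (fun m j =>
             pvSetCell m (i - (x - p)).toNat (j - (y - p)).toNat (pvVal grille_eclairage n i j)) st.2))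
        ((List.range c).map (fun _ => (List.range c).map (fun _ => (0:Int))),
         (List.range c).map (fun _ => (List.range c).map (fun _ => (0:Int)))) := by
        apply PySem.List.foldl_congr_mem
        intro st i _
        rw [hfun i]
        exact hsplit i st
    _ = _ := by
        rw [PySem.List.foldl_prod_mk
          (f := fun m i => ((List.range c).map (fun t : Nat => (y - p) + (t:Int))).foldl (fun m j =>
             pvSetCell m (i - (x - p)).toNat (j - (y - p)).toNat (pvVal grille n i j)) m)
          (g := fun m i => ((List.range c).map (fun t : Nat => (y - p) + (t:Int))).foldl (fun m j =>
             pvSetCell m (i - (x - p)).toNat (j - (y - p)).toNat (pvVal grille_eclairage n i j)) m)]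
        rw [pv_matFill grille n c (x - p) (y - p), pv_matFill grille_eclairage n c (x - p) (y - p)]

-- pointwise agreement of A's condensed value with B's cell
theorem pv_cell_eq (grille grille_eclairage : List (List Int)) (n i j : Int) :
    (if pvVal grille n i j ≠ 0 ∧ pvVal grille_eclairage n i j = 0 then 0 else pvVal grille n i j)
    = pvCell grille grille_eclairage n i j := by
  by_cases hb : 0 ≤ i ∧ i < n ∧ 0 ≤ j ∧ j < n
  · simp [pvVal, pvCell, hb]
  · simp [pvVal, pvCell, hb]

theorem pv_main (grille grille_eclairage : List (List Int)) (position : Int × Int)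
    (portee_affichage : Int) :
    creer_vue grille grille_eclairage position portee_affichage
    = creer_vue_alt grille grille_eclairage position portee_affichage := by
  obtain ⟨x, y⟩ := position
  by_cases hp : 0 < 2*portee_affichage+1
  · set p := portee_affichage
    set c := (2*p+1).toNat with hc
    unfold creer_vue
    rw [pv_deux_vues_eq grille grille_eclairage x y p hp]
    rw [pv_vue_unique_eq c
      (fun k l => pvVal grille grille.length ((x - p) + (k:Int)) ((y - p) + (l:Int)))
      (fun k l => pvVal grille_eclairage grille.length ((x - p) + (k:Int)) ((y - p) + (l:Int)))]
    unfold creer_vue_alt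
    simp only
    rw [show PySem.List.pyRange 0 (2*p+1) 1 = (List.range c).map (fun t : Nat => (0:Int) + (t:Int)) by
      rw [PySem.List.pyRange_one, show ((2*p+1) - 0).toNat = c by omega]]
    rw [List.map_map]
    apply List.map_congr_left
    intro k _
    simp only [Function.comp_apply]
    rw [List.map_map]
    apply List.map_congr_left
    intro l _
    simp only [Function.comp_apply]
    show (if _ then (0:Int) else _) = pvCell grille grille_eclairage (grille.length : Int) (x - p + ((0:Int) + (k:Int))) (y - p + ((0:Int) + (l:Int)))
    rw [show x - p + ((0:Int) + (k:Int)) = (x - p) + (k:Int) by ring,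
        show y - p + ((0:Int) + (l:Int)) = (y - p) + (l:Int) by ring]
    exact pv_cell_eq grille grille_eclairage (grille.length : Int) _ _
  · have h1 : PySem.List.pyRange 0 (2*portee_affichage+1) 1 = [] :=
      PySem.List.pyRange_one_eq_nil (by omega)
    have h2 : PySem.List.pyRange (x - portee_affichage) (x + portee_affichage + 1) 1 = [] :=
      PySem.List.pyRange_one_eq_nil (by omega)
    simp [creer_vue, pv_creer_deux_vues, pv_vue_unique, creer_vue_alt, h1, h2]

-- ===== VERDICT (by name: the statement is the Claim_ definition above) =====
theorem creer_vue_spec : Claim_equal_creer_vue := by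
  intro grille grille_eclairage position portee_affichage _ _
  unfold Spec_creer_vue
  exact pv_main grille grille_eclairage position portee_affichage
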